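-- pv_equiv track=rewrite | github.com/KiazaHunor/Szisarp | Git hub feladatok/Pyton/monogram.py | eltol
-- ===== SOURCE A (Python) =====
-- def eltol(pontok, x, y):
--     vissza = []
--     for e, pont in enumerate(pontok):
--         if e % 2 == 0:
--             vissza.append(pont + x)
--         else:
--             vissza.append(pont + y)
--     return vissza
-- ===== SOURCE B (Python) =====
-- def eltol(pontok, x, y):
--     vissza = list(pontok)
--     vissza[0::2] = [p + x for p in pontok[0::2]]
--     vissza[1::2] = [p + y for p in pontok[1::2]]
--     return vissza
-- ===== Notes on version B (the rewrite author's own statement) =====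
-- stated objective: alternative
-- what changed: Replaces the per-element parity branch inside one enumerate loop with two positionally-strided slice passes: copy the list, then overwrite the even and the odd positions with separate slice assignments.
import Mathlib
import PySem

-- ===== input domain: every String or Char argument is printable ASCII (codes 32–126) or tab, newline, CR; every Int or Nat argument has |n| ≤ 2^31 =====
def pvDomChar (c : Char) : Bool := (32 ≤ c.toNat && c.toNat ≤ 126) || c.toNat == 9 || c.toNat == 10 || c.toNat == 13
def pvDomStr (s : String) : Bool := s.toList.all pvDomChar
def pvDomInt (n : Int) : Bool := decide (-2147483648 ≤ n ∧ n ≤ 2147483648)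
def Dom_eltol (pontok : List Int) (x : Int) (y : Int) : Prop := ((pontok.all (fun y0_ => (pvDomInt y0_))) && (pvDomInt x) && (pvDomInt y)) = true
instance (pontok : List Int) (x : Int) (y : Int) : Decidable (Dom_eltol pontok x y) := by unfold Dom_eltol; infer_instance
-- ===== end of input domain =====

-- ===== PORT A =====
-- Header: B replaces A's single enumerate loop with a parity branch by two strided
-- slice passes (even/odd positions handled separately, then interleaved); alternative
-- decomposition, same cost. Neither program mutates its argument.
def eltol (pontok : List Int) (x : Int) (y : Int) : List Int :=
  (PySem.List.enumerate pontok).foldl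
    (fun vissza ep =>
      if PySem.Int.mod ep.1 2 == 0 then vissza ++ [ep.2 + x] else vissza ++ [ep.2 + y])
    []

-- ===== PORT B =====
-- hand port of the step-2 slice l[0::2] (no step slices in PySem): exact — takes
-- every second element starting at index 0
def pvStride2 : List Int → List Int
  | [] => []
  | [a] => [a]
  | a :: _ :: rest => a :: pvStride2 rest

-- hand port of the two strided slice ASSIGNMENTS vissza[0::2] = es; vissza[1::2] = os
-- (exact when es, os have the slice lengths, which B guarantees): the result places
-- es at even positions and os at odd positions, i.e. interleaves them
def pvInterleave : List Int → List Int → List Int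
  | [], ys => ys
  | a :: as, ys => a :: pvInterleave ys as
termination_by xs ys => xs.length + ys.length
decreasing_by simp; omega

def eltol_alt (pontok : List Int) (x : Int) (y : Int) : List Int :=
  pvInterleave
    ((pvStride2 pontok).map (fun p => p + x))
    ((pvStride2 pontok.tail).map (fun p => p + y))

-- ===== PRECONDITION & SPEC =====
def Spec_eltol (pontok : List Int) (x : Int) (y : Int) (out : List Int) : Prop := out = eltol_alt pontok x y
instance (pontok : List Int) (x : Int) (y : Int) (out : List Int) : Decidable (Spec_eltol pontok x y out) := by unfold Spec_eltol; infer_instance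

-- ===== CLAIM (what is proved, stated in full; the proofs are below) =====
def Claim_equal_eltol : Prop := ∀ (pontok : List Int) (x : Int) (y : Int), Dom_eltol pontok x y → Spec_eltol pontok x y (eltol pontok x y)

-- ===== LEMMAS AND PROOFS =====

-- reference form: alternate adding x and y (swap on each step)
def pvCore (x y : Int) : List Int → List Int
  | [] => []
  | a :: l => (a + x) :: pvCore y x l

theorem pvStride2_cons (a : Int) (l : List Int) :
    pvStride2 (a :: l) = a :: pvStride2 l.tail := by
  cases l <;> rfl

theorem eltol_alt_eq_core (pontok : List Int) (x y : Int) :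
    eltol_alt pontok x y = pvCore x y pontok := by
  induction pontok generalizing x y with
  | nil => simp [eltol_alt, pvStride2, pvInterleave, pvCore]
  | cons a l ih =>
    simp only [eltol_alt] at ih ⊢
    rw [pvStride2_cons, List.tail_cons, List.map_cons, pvInterleave, pvCore]
    exact congrArg _ (ih y x)

theorem eltol_loop (l : List Int) (x y : Int) : ∀ (e : Int) (acc : List Int), 0 ≤ e →
    (PySem.List.enumerate l e).foldl
      (fun vissza ep =>
        if PySem.Int.mod ep.1 2 == 0 then vissza ++ [ep.2 + x] else vissza ++ [ep.2 + y])
      acc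
    = acc ++ (if PySem.Int.mod e 2 == 0 then pvCore x y l else pvCore y x l) := by
  induction l generalizing x y with
  | nil => intro e acc _; simp [PySem.List.enumerate_nil, pvCore]
  | cons a l ih =>
    intro e acc he
    have hmod : PySem.Int.mod (e + 1) 2 == 0 ↔ ¬ (PySem.Int.mod e 2 == 0) := by
      simp only [PySem.Int.mod, Int.fmod_eq_emod, beq_iff_eq]
      omega
    simp only [PySem.List.enumerate_cons, List.foldl_cons]
    by_cases h : PySem.Int.mod e 2 == 0
    · rw [if_pos h, ih x y (e + 1) _ (by omega), if_neg (by simpa using hmod.not_left.mpr (by simpa using h)),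
        if_pos h]
      simp [pvCore]
    · rw [if_neg h, ih x y (e + 1) _ (by omega), if_pos (hmod.mpr h), if_neg h]
      simp [pvCore]

-- ===== VERDICT (by name: the statement is the Claim_ definition above) =====
theorem eltol_spec : Claim_equal_eltol := by
  intro pontok x y _
  unfold Spec_eltol
  rw [eltol_alt_eq_core]
  unfold eltol
  rw [eltol_loop pontok x y 0 [] (by omega)]
  simp [PySem.Int.mod]
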